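-- pv_equiv track=rewrite | github.com/evancjx/Network-Science-Project | graph/analyzer/degree_analyzer.py | count_node_with_degree_x
-- ===== SOURCE A (Python) =====
-- def count_node_with_degree_x(node_degree):
--     degree_frequency = {}
--     for key, value in node_degree.items():
--         if value not in degree_frequency:
--             degree_frequency[value] = 0
--         degree_frequency[value] += 1
--     s_degree_frequency = dict()
--     for key in sorted(degree_frequency.keys()):
--         s_degree_frequency[key] = degree_frequency[key]
--     return s_degree_frequency
-- ===== SOURCE B (Python) =====
-- def count_node_with_degree_x(node_degree):
--     # Sort the degree values once, then run-length encode consecutive runs: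
--     # no frequency hash map and no separate key-sort/rebuild pass.
--     result = {}
--     run_val = None
--     run_len = 0
--     for v in sorted(node_degree.values()):
--         if run_len > 0 and v == run_val:
--             run_len += 1
--         else:
--             if run_len > 0:
--                 result[run_val] = run_len
--             run_val = v
--             run_len = 1
--     if run_len > 0:
--         result[run_val] = run_len
--     return result
-- ===== Notes on version B (the rewrite author's own statement) =====
-- stated objective: alternative
-- what changed: Replaces A's counting hash map plus separate key-sort-and-rebuild pass by sorting the values once and run-length encoding consecutive equal runs directly into the result dict.
import Mathlib
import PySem

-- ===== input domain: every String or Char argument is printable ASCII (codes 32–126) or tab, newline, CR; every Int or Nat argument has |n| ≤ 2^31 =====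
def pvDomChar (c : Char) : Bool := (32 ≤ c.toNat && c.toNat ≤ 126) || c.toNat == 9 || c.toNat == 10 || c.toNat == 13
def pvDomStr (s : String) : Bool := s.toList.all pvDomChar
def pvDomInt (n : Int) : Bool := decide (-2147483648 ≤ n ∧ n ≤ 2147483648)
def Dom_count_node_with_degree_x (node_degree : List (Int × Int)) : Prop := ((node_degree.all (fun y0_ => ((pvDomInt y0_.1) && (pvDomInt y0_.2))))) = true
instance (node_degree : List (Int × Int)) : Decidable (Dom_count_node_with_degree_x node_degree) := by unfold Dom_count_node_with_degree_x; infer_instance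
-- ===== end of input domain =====

-- B sorts the degree values once and run-length encodes consecutive runs, instead of
-- A's counting hash map followed by a separate key-sort-and-rebuild pass (alternative).


-- ===== PORT A =====
def count_node_with_degree_x (node_degree : List (Int × Int)) : List (Int × Int) :=
  -- degree_frequency = {}; for key, value in node_degree.items(): if value not in df: df[value] = 0; df[value] += 1
  let degree_frequency : PySem.Dict Int Int :=
    node_degree.foldl
      (fun d p =>
        let d := if d.contains p.2 then d else d.insert p.2 0
        d.insert p.2 (d.getD p.2 0 + 1))
      PySem.Dict.empty
  -- s_degree_frequency = dict(); for key in sorted(df.keys()): s[key] = df[key]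
  let s_degree_frequency : PySem.Dict Int Int :=
    (PySem.List.sorted degree_frequency.keys (fun k => k) false).foldl
      (fun s k => s.insert k (degree_frequency.getD k 0))
      PySem.Dict.empty
  s_degree_frequency.items

-- ===== PORT B =====
-- state = (result dict, run_val : Option Int, run_len : Int); the 'none' match arm is
-- the unreachable run_val = None case (guarded by run_len > 0 in the Python).
def pvFlush (st : PySem.Dict Int Int × Option Int × Int) : PySem.Dict Int Int :=
  if st.2.2 > 0 then
    match st.2.1 with
    | some k => st.1.insert k st.2.2
    | none => st.1
  else st.1

def pvStep (st : PySem.Dict Int Int × Option Int × Int) (v : Int) :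
    PySem.Dict Int Int × Option Int × Int :=
  if st.2.2 > 0 && (some v == st.2.1) then (st.1, st.2.1, st.2.2 + 1)
  else (pvFlush st, some v, 1)

def count_node_with_degree_x_alt (node_degree : List (Int × Int)) : List (Int × Int) :=
  let final :=
    (PySem.List.sorted (node_degree.map (·.2)) (fun v => v) false).foldl pvStep
      (PySem.Dict.empty, none, 0)
  (pvFlush final).items

-- ===== PRECONDITION & SPEC =====
-- Pre_ excludes association lists with duplicate keys: the Python argument is a dict,
-- whose keys are necessarily distinct, so such lists represent no Python input.
def Pre_count_node_with_degree_x (node_degree : List (Int × Int)) : Prop :=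
  (node_degree.map Prod.fst).Nodup
instance (node_degree : List (Int × Int)) : Decidable (Pre_count_node_with_degree_x node_degree) := by
  unfold Pre_count_node_with_degree_x; infer_instance
def pvWitness_count_node_with_degree_x : (List (Int × Int)) := [(1, 2), (2, 2), (3, 1)]

def Spec_count_node_with_degree_x (node_degree : List (Int × Int)) (out : List (Int × Int)) : Prop := out = count_node_with_degree_x_alt node_degree
instance (node_degree : List (Int × Int)) (out : List (Int × Int)) : Decidable (Spec_count_node_with_degree_x node_degree out) := by unfold Spec_count_node_with_degree_x; infer_instance

-- ===== CLAIM (what is proved, stated in full; the proofs are below) =====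
def Claim_equal_count_node_with_degree_x : Prop := ∀ (node_degree : List (Int × Int)), Dom_count_node_with_degree_x node_degree → Pre_count_node_with_degree_x node_degree → Spec_count_node_with_degree_x node_degree (count_node_with_degree_x node_degree)


-- ===== LEMMAS AND PROOFS =====

-- the distinct degree values, ascending
def pvKeys (vals : List Int) : List Int :=
  PySem.List.sorted (PySem.Set.ofList vals) (fun x => x) false

-- the common result: one (value, multiplicity) pair per distinct value, ascending
def pvR (vals : List Int) : List (Int × Int) :=
  (pvKeys vals).map (fun k => (k, (vals.count k : Int)))

lemma pv_items_empty : (PySem.Dict.empty : PySem.Dict Int Int).items = [] := rfl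

lemma nodup_pvKeys (vals : List Int) : (pvKeys vals).Nodup :=
  (PySem.List.sorted_perm _ _ _).symm.nodup (PySem.Set.nodup_ofList vals)

lemma pairwise_pvKeys (vals : List Int) : (pvKeys vals).Pairwise (· < ·) :=
  PySem.List.sorted_ofList_pairwise_lt vals

lemma mem_pvKeys (vals : List Int) (a : Int) : a ∈ pvKeys vals ↔ a ∈ vals := by
  unfold pvKeys
  rw [PySem.List.mem_sorted, PySem.Set.mem_ofList]

-- A's compound loop body ('if value not in df: df[value] = 0; df[value] += 1') is the counter step
lemma stepA_eq (d : PySem.Dict Int Int) (v : Int) :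
    (let d' := if d.contains v then d else d.insert v 0
     d'.insert v (d'.getD v 0 + 1)) = d.insert v (d.getD v 0 + 1) := by
  by_cases h : d.contains v
  · simp [h]
  · simp only [h, Bool.false_eq_true, if_false]
    rw [PySem.Dict.getD_insert_self, PySem.Dict.insert_insert_self,
      PySem.Dict.getD_of_not_contains _ _ (by simpa using h)]

lemma a_side (nd : List (Int × Int)) :
    count_node_with_degree_x nd = pvR (nd.map (·.2)) := by
  simp only [count_node_with_degree_x]
  have hstep : (fun (d : PySem.Dict Int Int) (p : Int × Int) =>
      let d' := if d.contains p.2 then d else d.insert p.2 0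
      d'.insert p.2 (d'.getD p.2 0 + 1))
      = fun d p => d.insert p.2 (d.getD p.2 0 + 1) := by
    funext d p; exact stepA_eq d p.2
  rw [hstep]
  have hfold : List.foldl (fun (d : PySem.Dict Int Int) (p : Int × Int) =>
      d.insert p.2 (d.getD p.2 0 + 1)) PySem.Dict.empty nd
      = PySem.Dict.counter (nd.map (·.2)) := by
    rw [← PySem.Dict.foldl_insert_getD_add_one_eq_counter, List.foldl_map]
  rw [hfold, PySem.Dict.keys_counter]
  rw [PySem.Dict.items_foldl_insert_fresh _ (fun a => a)
      (fun a => (PySem.Dict.counter (nd.map (·.2))).getD a 0) _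
      (fun a _ => PySem.Dict.contains_empty a) (by simpa using nodup_pvKeys (nd.map (·.2)))]
  simp [pvR, pvKeys, PySem.Dict.getD_counter, pv_items_empty]

lemma count_flatMap_rep (c : Int → Nat) (a : Int) :
    ∀ (ks : List Int), ks.Nodup →
      (ks.flatMap (fun k => List.replicate (c k) k)).count a = if a ∈ ks then c a else 0 := by
  intro ks
  induction ks with
  | nil => simp
  | cons k t ih =>
    intro hnd
    rcases List.nodup_cons.mp hnd with ⟨hk, ht⟩
    simp only [List.flatMap_cons, List.count_append, List.count_replicate, ih ht]
    by_cases hak : a = k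
    · subst hak; simp [hk]
    · simp [hak, Ne.symm hak]

lemma pairwise_flatMap_rep (c : Int → Nat) :
    ∀ (ks : List Int), ks.Pairwise (· < ·) →
      (ks.flatMap (fun k => List.replicate (c k) k)).Pairwise (· ≤ ·) := by
  intro ks
  induction ks with
  | nil => simp
  | cons k t ih =>
    intro hp
    rcases List.pairwise_cons.mp hp with ⟨hk, ht⟩
    simp only [List.flatMap_cons]
    rw [List.pairwise_append]
    refine ⟨List.pairwise_replicate.mpr (Or.inr le_rfl), ih ht, ?_⟩
    intro x hx y hy
    obtain rfl := List.eq_of_mem_replicate hx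
    rcases List.mem_flatMap.mp hy with ⟨k', hk', hy'⟩
    obtain rfl := List.eq_of_mem_replicate hy'
    exact le_of_lt (hk y hk')

-- sorted(values) is the concatenation of one constant run per distinct value, ascending
lemma sorted_eq_flatMap (vals : List Int) :
    PySem.List.sorted vals (fun v => v) false
      = (pvKeys vals).flatMap (fun k => List.replicate (vals.count k) k) := by
  apply PySem.List.sorted_id_eq_of_perm_of_pairwise
  · rw [List.perm_iff_count]
    intro a
    rw [count_flatMap_rep (fun k => vals.count k) a (pvKeys vals) (nodup_pvKeys vals)]
    by_cases ha : a ∈ pvKeys vals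
    · simp [ha]
    · rw [if_neg ha, eq_comm, List.count_eq_zero]
      exact fun hmem => ha ((mem_pvKeys vals a).mpr hmem)
  · exact pairwise_flatMap_rep _ _ (pairwise_pvKeys vals)

-- a run of equal values only extends the current run counter
lemma rle_group (k : Int) (d : PySem.Dict Int Int) :
    ∀ (c : Nat) (m : Int), 1 ≤ m →
      List.foldl pvStep (d, some k, m) (List.replicate c k) = (d, some k, m + c) := by
  intro c
  induction c with
  | zero => intro m hm; simp
  | succ n ih =>
    intro m hm
    rw [List.replicate_succ, List.foldl_cons]
    have hstep : pvStep (d, some k, m) k = (d, some k, m + 1) := by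
      simp [pvStep, show (0:Int) < m from hm]
    rw [hstep, ih (m + 1) (by omega)]
    refine congrArg (fun z => (d, some k, z)) ?_
    push_cast; ring

-- the run-length loop over the grouped list flushes exactly one pair per distinct value
lemma rle_main (c : Int → Nat) :
    ∀ (ks : List Int) (d : PySem.Dict Int Int) (k0 : Int) (m : Int), 1 ≤ m →
      (∀ k ∈ ks, 1 ≤ c k) → ks.Pairwise (· < ·) → (∀ k ∈ ks, k0 < k) →
      pvFlush (List.foldl pvStep (d, some k0, m) (ks.flatMap (fun k => List.replicate (c k) k)))
        = List.foldl (fun d' k => d'.insert k ((c k : Int))) (d.insert k0 m) ks := by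
  intro ks
  induction ks with
  | nil =>
    intro d k0 m hm _ _ _
    simp [pvFlush, show (0:Int) < m from hm]
  | cons k t ih =>
    intro d k0 m hm hc hp hlt
    rcases List.pairwise_cons.mp hp with ⟨hkt, hpt⟩
    have hck : 1 ≤ c k := hc k (List.mem_cons_self ..)
    simp only [List.flatMap_cons]
    rw [List.foldl_append, show c k = (c k - 1) + 1 from by omega, List.replicate_succ,
      List.foldl_cons]
    have h1 : pvStep (d, some k0, m) k = (d.insert k0 m, some k, 1) := by
      have hne : k ≠ k0 := ne_of_gt (hlt k (List.mem_cons_self ..))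
      simp [pvStep, pvFlush, show (0:Int) < m from hm, hne]
    rw [h1, rle_group k _ (c k - 1) 1 le_rfl]
    have hcast : (1 : Int) + ((c k - 1 : Nat) : Int) = (c k : Int) := by
      omega
    rw [hcast, List.foldl_cons]
    exact ih ((d.insert k0 m)) k (c k) (by exact_mod_cast hck)
      (fun x hx => hc x (List.mem_cons_of_mem _ hx)) hpt hkt

lemma b_side (nd : List (Int × Int)) :
    count_node_with_degree_x_alt nd = pvR (nd.map (·.2)) := by
  unfold count_node_with_degree_x_alt
  rw [sorted_eq_flatMap]
  have hc : ∀ x ∈ pvKeys (nd.map (·.2)), 1 ≤ (nd.map (·.2)).count x := by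
    intro x hx
    exact List.count_pos_iff.mpr ((mem_pvKeys _ x).mp hx)
  rcases hks : pvKeys (nd.map (·.2)) with _ | ⟨k, t⟩
  · simp [hks, pvFlush, pvR, pv_items_empty]
  · have hck : 1 ≤ (nd.map (·.2)).count k := hc k (by rw [hks]; exact List.mem_cons_self ..)
    rw [hks]
    simp only [List.flatMap_cons]
    rw [List.foldl_append, show (nd.map (·.2)).count k = ((nd.map (·.2)).count k - 1) + 1 from
      by omega, List.replicate_succ, List.foldl_cons]
    have h0 : pvStep (PySem.Dict.empty, none, 0) k = (PySem.Dict.empty, some k, 1) := by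
      simp [pvStep, pvFlush]
    rw [h0, rle_group k _ _ 1 le_rfl]
    have hcast : (1 : Int) + (((nd.map (·.2)).count k - 1 : Nat) : Int)
        = (((nd.map (·.2)).count k : Nat) : Int) := by omega
    rw [hcast]
    have hp := pairwise_pvKeys (nd.map (·.2)); rw [hks] at hp
    rcases List.pairwise_cons.mp hp with ⟨hkt, hpt⟩
    rw [rle_main (fun x => (nd.map (·.2)).count x) t PySem.Dict.empty k _
      (by exact_mod_cast hck)
      (fun x hx => hc x (by rw [hks]; exact List.mem_cons_of_mem _ hx)) hpt hkt]
    have : PySem.Dict.empty.insert k (((nd.map (·.2)).count k : Nat) : Int)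
        = List.foldl (fun (d' : PySem.Dict Int Int) x => d'.insert x (((nd.map (·.2)).count x : Nat) : Int)) PySem.Dict.empty [k] := by
      simp
    rw [this, ← List.foldl_append]
    have hfresh := PySem.Dict.items_foldl_insert_fresh ([k] ++ t) (fun a => a)
      (fun a => (((nd.map (·.2)).count a : Nat) : Int)) PySem.Dict.empty
      (fun a _ => PySem.Dict.contains_empty a)
      (by have h := nodup_pvKeys (nd.map (·.2)); rw [hks] at h; simpa using h)
    rw [hfresh]
    simp [pvR, hks, pv_items_empty]

-- ===== VERDICT (by name: the statement is the Claim_ definition above) =====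
theorem count_node_with_degree_x_spec : Claim_equal_count_node_with_degree_x := by
  intro nd _ _
  unfold Spec_count_node_with_degree_x
  rw [a_side, b_side]
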